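-- pv_equiv track=rewrite | github.com/gh0stintheshe11/LeetCode-Solutions | solutions/2272.substring-with-largest-variance/Python3.py | largestVariance
-- ===== SOURCE A (Python) =====
-- from collections import defaultdict
-- import itertools
--
-- def largestVariance(s: str) -> int:
--     char_count = defaultdict(int)
--     char_index = defaultdict(list)
--     for i, ch in enumerate(s):
--         char_count[ch] += 1
--         char_index[ch].append((i, ch))
--
--     max_variance = 0
--     for char_a, char_b in itertools.permutations(char_count.keys(), 2):
--         total, has_b = 0, False
--         if char_count[char_b] - 1 > max_variance:
--             for _, x in sorted(char_index[char_a] + char_index[char_b]):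
--                 if x == char_a and (has_b := total > 0):
--                     total -= 1
--                 elif x == char_b:
--                     max_variance = max(max_variance, total + has_b)
--                     total += 1
--     return max_variance
-- ===== SOURCE B (Python) =====
-- def largestVariance(s: str) -> int:
--     positions = {}
--     for i, ch in enumerate(s):
--         if ch in positions:
--             positions[ch].append(i)
--         else:
--             positions[ch] = [i]
--     best = 0
--     keys = list(positions)
--     for a in keys:
--         for b in keys:
--             pb = positions[b]
--             if a == b or len(pb) - 1 <= best:
--                 continue
--             pa = positions[a]
--             la, lb = len(pa), len(pb)
--             i = j = 0
--             total, has_b = 0, False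
--             while i < la or j < lb:
--                 if j >= lb or (i < la and pa[i] < pb[j]):
--                     has_b = total > 0
--                     if has_b:
--                         total -= 1
--                     i += 1
--                 else:
--                     if total + has_b > best:
--                         best = total + has_b
--                     total += 1
--                     j += 1
--     return best
-- ===== Notes on version B (the rewrite author's own statement) =====
-- stated objective: faster
-- what changed: B stores per-character occurrence-index lists (built in one pass) and, for each ordered character pair, runs the Kadane-style scan over a two-pointer merge of the two presorted index lists, instead of A's concatenating the two index lists and re-sorting them with sorted() for every pair.
import Mathlib
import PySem

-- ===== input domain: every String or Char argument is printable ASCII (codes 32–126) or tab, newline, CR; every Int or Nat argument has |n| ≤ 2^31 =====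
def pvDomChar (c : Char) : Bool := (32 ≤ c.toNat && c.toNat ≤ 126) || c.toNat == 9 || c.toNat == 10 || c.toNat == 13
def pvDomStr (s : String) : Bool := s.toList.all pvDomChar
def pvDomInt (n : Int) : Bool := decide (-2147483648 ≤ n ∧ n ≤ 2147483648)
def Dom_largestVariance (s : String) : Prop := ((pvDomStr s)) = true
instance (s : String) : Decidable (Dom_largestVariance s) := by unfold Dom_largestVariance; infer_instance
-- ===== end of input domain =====

-- B replaces A's per-pair re-sort of the two occurrence lists by a two-pointer merge of the
-- presorted per-character index lists (objective: faster — the sort is removed).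

-- ===== PORT A =====
-- inner loop body of A: 'if x == char_a and (has_b := total > 0): total -= 1
--                        elif x == char_b: max_variance = max(max_variance, total + has_b); total += 1'
-- (the walrus ':=' assigns has_b whenever x == char_a, even when it becomes False;
--  the 'elif' is reached in that case, hence the nested test). State: (total, has_b, max_variance).
def pvStepA (char_a char_b : Char) (st : Int × Bool × Int) (x : Char) : Int × Bool × Int :=
  match st with
  | (total, has_b, mv) =>
    if x == char_a then
      let has_b := decide (0 < total)
      if has_b then (total - 1, has_b, mv)
      else if x == char_b then (total + 1, has_b, max mv (total + (if has_b then 1 else 0)))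
      else (total, has_b, mv)
    else if x == char_b then (total + 1, has_b, max mv (total + (if has_b then 1 else 0)))
    else (total, has_b, mv)

def largestVariance (s : String) : Int :=
  -- one loop over enumerate(s) filling char_count and char_index (defaultdicts)
  let dicts := (PySem.List.enumerate s.toList 0).foldl
    (fun (st : PySem.Dict Char Int × PySem.Dict Char (List (Int × Char))) q =>
      (st.1.modify q.2 0 (· + 1), st.2.modify q.2 [] (· ++ [q])))
    (PySem.Dict.empty, PySem.Dict.empty)
  (PySem.List.permutations dicts.1.keys 2).foldl
    (fun max_variance pr =>
      match pr with
      | [char_a, char_b] =>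
        if dicts.1.getD char_b 0 - 1 > max_variance then
          ((PySem.List.sorted2 (dicts.2.getD char_a [] ++ dicts.2.getD char_b [])
              (·.1) (·.2)).foldl
            (fun st q => pvStepA char_a char_b st q.2) (0, false, max_variance)).2.2
        else max_variance
      | _ => max_variance)  -- unreachable: permutations _ 2 yields only 2-element lists
    0

-- ===== PORT B =====
-- the two branch bodies of B's merge loop; state (total, has_b, best)
def pvStepSa (st : Int × Bool × Int) : Int × Bool × Int :=
  let has_b := decide (0 < st.1)
  if has_b then (st.1 - 1, has_b, st.2.2) else (st.1, has_b, st.2.2)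

def pvStepSb (st : Int × Bool × Int) : Int × Bool × Int :=
  let v := st.1 + (if st.2.1 then 1 else 0)
  (st.1 + 1, st.2.1, if st.2.2 < v then v else st.2.2)

-- B's 'while i < la or j < lb' two-pointer loop, as structural recursion on the two
-- remaining suffixes pa[i:], pb[j:] (exact: the branch test 'j >= lb or (i < la and pa[i] < pb[j])')
def pvMergeRun : List Int → List Int → Int × Bool × Int → Int × Bool × Int
  | [], [], st => st
  | _ :: xs, [], st => pvMergeRun xs [] (pvStepSa st)
  | [], _ :: ys, st => pvMergeRun [] ys (pvStepSb st)
  | x :: xs, y :: ys, st =>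
    if x < y then pvMergeRun xs (y :: ys) (pvStepSa st)
    else pvMergeRun (x :: xs) ys (pvStepSb st)
  termination_by xs ys _ => xs.length + ys.length

def largestVariance_alt (s : String) : Int :=
  let positions := (PySem.List.enumerate s.toList 0).foldl
    (fun (d : PySem.Dict Char (List Int)) q =>
      if d.contains q.2 then d.modify q.2 [] (· ++ [q.1]) else d.insert q.2 [q.1])
    PySem.Dict.empty
  let keys := positions.keys
  keys.foldl (fun best a =>
    keys.foldl (fun best b =>
      let pb := positions.getD b []
      if a = b ∨ (pb.length : Int) - 1 ≤ best then best
      else (pvMergeRun (positions.getD a []) pb (0, false, best)).2.2) best) 0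

-- ===== PRECONDITION & SPEC =====
def Spec_largestVariance (s : String) (out : Int) : Prop := out = largestVariance_alt s
instance (s : String) (out : Int) : Decidable (Spec_largestVariance s out) := by unfold Spec_largestVariance; infer_instance

-- ===== CLAIM (what is proved, stated in full; the proofs are below) =====
def Claim_equal_largestVariance : Prop := ∀ (s : String), Dom_largestVariance s → Spec_largestVariance s (largestVariance s)

-- ===== LEMMAS AND PROOFS =====

-- merge (by first component) of two index-tagged lists; mirror of pvMergeRun's branching
def pvMrg : List (Int × Char) → List (Int × Char) → List (Int × Char)
  | [], ys => ys
  | xs, [] => xs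
  | x :: xs, y :: ys =>
    if x.1 < y.1 then x :: pvMrg xs (y :: ys) else y :: pvMrg (x :: xs) ys
  termination_by xs ys => xs.length + ys.length

theorem pvMrg_nil_right (xs : List (Int × Char)) : pvMrg xs [] = xs := by
  cases xs <;> simp [pvMrg]

theorem pvMrg_cons_left_min (e : Int × Char) (xs ys : List (Int × Char))
    (h : ∀ r ∈ ys, e.1 < r.1) : pvMrg (e :: xs) ys = e :: pvMrg xs ys := by
  cases ys with
  | nil => rw [pvMrg_nil_right, pvMrg_nil_right]
  | cons y ys => simp [pvMrg, h y (by simp)]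

theorem pvMrg_cons_right_min (e : Int × Char) (xs ys : List (Int × Char))
    (h : ∀ r ∈ xs, e.1 < r.1) : pvMrg xs (e :: ys) = e :: pvMrg xs ys := by
  cases xs with
  | nil => simp [pvMrg]
  | cons x xs => simp [pvMrg, not_lt_of_gt (h x (by simp))]

-- merge of two disjoint filters of a fst-increasing list is the joint filter
theorem pvMrg_filter (pa pb : Int × Char → Bool) :
    ∀ (l : List (Int × Char)), l.Pairwise (fun q r => q.1 < r.1) →
    (∀ q, pa q = true → pb q = false) →
    pvMrg (l.filter pa) (l.filter pb) = l.filter (fun q => pa q || pb q) := by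
  intro l
  induction l with
  | nil => intro _ _; simp [pvMrg]
  | cons e l ih =>
    intro hpw hd
    have he : ∀ r ∈ l, e.1 < r.1 := (List.pairwise_cons.mp hpw).1
    have hpw' := (List.pairwise_cons.mp hpw).2
    by_cases hpa : pa e = true
    · have hpb : pb e = false := hd e hpa
      simp only [List.filter_cons, hpa, hpb, if_true, Bool.false_eq_true, if_false,
        Bool.true_or]
      rw [pvMrg_cons_left_min e _ _ (fun r hr => he r (List.mem_of_mem_filter hr)),
        ih hpw' hd]
    · by_cases hpb : pb e = true
      · simp only [List.filter_cons, hpa, hpb, Bool.false_eq_true, if_false, if_true]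
        rw [pvMrg_cons_right_min e _ _ (fun r hr => he r (List.mem_of_mem_filter hr)),
          ih hpw' hd]
        simp
      · simp only [List.filter_cons, hpa, hpb, Bool.false_eq_true, if_false]
        rw [ih hpw' hd]
        simp

-- insertBy only compares inserted elements: congruence
theorem pvInsertBy_congr (f g : Int × Char → Int × Char → Bool) (x : Int × Char) :
    ∀ (l : List (Int × Char)), (∀ y ∈ l, f x y = g x y) →
    PySem.List.insertBy f x l = PySem.List.insertBy g x l := by
  intro l
  induction l with
  | nil => intro _; rfl
  | cons y ys ih =>
    intro h
    simp only [PySem.List.insertBy, h y (by simp)]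
    by_cases hg : g x y = true <;> simp [hg, ih (fun z hz => h z (by simp [hz]))]

theorem pvFoldl_insertBy_congr (f g : Int × Char → Int × Char → Bool) :
    ∀ (xs acc : List (Int × Char)),
    (∀ x ∈ xs, ∀ y, (y ∈ acc ∨ y ∈ xs) → f x y = g x y) →
    xs.foldl (fun acc x => PySem.List.insertBy f x acc) acc
      = xs.foldl (fun acc x => PySem.List.insertBy g x acc) acc := by
  intro xs
  induction xs with
  | nil => intro _ _; rfl
  | cons x xs ih =>
    intro acc h
    simp only [List.foldl_cons]
    rw [pvInsertBy_congr f g x acc (fun y hy => h x (by simp) y (Or.inl hy)),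
      ih (PySem.List.insertBy g x acc)]
    intro z hz y hy
    refine h z (by simp [hz]) y ?_
    rcases hy with hy | hy
    · rcases (PySem.List.mem_insertBy g x y acc).mp hy with hy | hy
      · exact Or.inr (by simp [hy])
      · exact Or.inl hy
    · exact Or.inr (by simp [hy])

-- Python's sorted on (index, char) pairs = sort by index, when equal indices force equal pairs
theorem pvSorted2_eq_sorted (xs : List (Int × Char))
    (h : ∀ x ∈ xs, ∀ y ∈ xs, x.1 = y.1 → x = y) :
    PySem.List.sorted2 xs (·.1) (·.2) = PySem.List.sorted xs (·.1) := by
  simp only [PySem.List.sorted2, PySem.List.sorted, if_neg (by decide : ¬(false = true))]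
  apply pvFoldl_insertBy_congr
  intro x hx y hy
  rcases hy with hy | hy
  · simp at hy
  · by_cases hxy : x.1 = y.1
    · have : x = y := h x hx y hy hxy
      subst this
      simp
    · rcases lt_or_gt_of_ne hxy with hlt | hgt
      · simp [hlt, asymm hlt]
      · simp [hgt, asymm hgt]

-- disjoint filter split, as a permutation
theorem pvFilter_or_perm (pa pb : Int × Char → Bool)
    (hd : ∀ q, pa q = true → pb q = false) :
    ∀ (l : List (Int × Char)),
    (l.filter (fun q => pa q || pb q)).Perm (l.filter pa ++ l.filter pb) := by
  intro l
  induction l with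
  | nil => simp
  | cons e l ih =>
    by_cases hpa : pa e = true
    · have hpb : pb e = false := hd e hpa
      simpa [List.filter_cons, hpa, hpb] using ih.cons e
    · by_cases hpb : pb e = true
      · simp only [List.filter_cons, hpa, hpb, Bool.false_eq_true, if_false, if_true,
          Bool.false_or]
        exact (ih.cons e).trans List.perm_middle.symm
      · simpa [List.filter_cons, hpa, hpb] using ih

-- the two branch bodies agree with A's inner step
theorem pvStepA_a (a b : Char) (st : Int × Bool × Int) (hab : a ≠ b) :
    pvStepA a b st a = pvStepSa st := by
  obtain ⟨t, h, mv⟩ := st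
  simp only [pvStepA, pvStepSa, beq_self_eq_true, if_true, beq_iff_eq]
  by_cases ht : (0:Int) < t <;> simp [ht, hab]

theorem pvStepA_b (a b : Char) (st : Int × Bool × Int) (hab : a ≠ b) :
    pvStepA a b st b = pvStepSb st := by
  obtain ⟨t, h, mv⟩ := st
  simp only [pvStepA, pvStepSb, beq_iff_eq]
  simp [Ne.symm hab, max_def_lt]

-- draining one side of the merge
theorem pvMergeRun_b_run (a b : Char) (hab : a ≠ b) :
    ∀ (ys : List (Int × Char)) (st : Int × Bool × Int), (∀ q ∈ ys, q.2 = b) →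
    pvMergeRun [] (ys.map (·.1)) st
      = ys.foldl (fun st q => pvStepA a b st q.2) st := by
  intro ys
  induction ys with
  | nil => intro st _; simp [pvMergeRun]
  | cons y ys ih =>
    intro st hyb
    simp only [List.map_cons, pvMergeRun, List.foldl_cons]
    rw [hyb y (by simp), pvStepA_b a b st hab]
    exact ih _ (fun q hq => hyb q (List.mem_cons_of_mem _ hq))

theorem pvMergeRun_a_run (a b : Char) (hab : a ≠ b) :
    ∀ (xs : List (Int × Char)) (st : Int × Bool × Int), (∀ q ∈ xs, q.2 = a) →
    pvMergeRun (xs.map (·.1)) [] st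
      = xs.foldl (fun st q => pvStepA a b st q.2) st := by
  intro xs
  induction xs with
  | nil => intro st _; simp [pvMergeRun]
  | cons x xs ih =>
    intro st hxa
    simp only [List.map_cons, pvMergeRun, List.foldl_cons]
    rw [hxa x (by simp), pvStepA_a a b st hab]
    exact ih _ (fun q hq => hxa q (List.mem_cons_of_mem _ hq))

-- B's merge loop = A's inner fold over the merged tagged list
theorem pvMergeRun_eq_foldl (a b : Char) (hab : a ≠ b) :
    ∀ (xs ys : List (Int × Char)) (st : Int × Bool × Int),
    (∀ q ∈ xs, q.2 = a) → (∀ q ∈ ys, q.2 = b) →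
    pvMergeRun (xs.map (·.1)) (ys.map (·.1)) st
      = (pvMrg xs ys).foldl (fun st q => pvStepA a b st q.2) st := by
  intro xs ys
  induction xs, ys using pvMrg.induct with
  | case1 ys =>
    intro st _ hyb
    simpa [pvMrg] using pvMergeRun_b_run a b hab ys st hyb
  | case2 xs hne =>
    intro st hxa _
    rw [pvMrg_nil_right]
    cases xs with
    | nil => exact absurd rfl hne
    | cons x xs => exact pvMergeRun_a_run a b hab (x :: xs) st hxa
  | case3 x xs y ys hlt ih =>
    intro st hxa hyb
    simp only [List.map_cons, pvMergeRun, pvMrg, if_pos hlt, List.foldl_cons]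
    rw [hxa x (by simp), pvStepA_a a b st hab]
    exact ih _ (fun q hq => hxa q (List.mem_cons_of_mem _ hq)) hyb
  | case4 x xs y ys hlt ih =>
    intro st hxa hyb
    simp only [List.map_cons, pvMergeRun, pvMrg, if_neg hlt, List.foldl_cons]
    rw [hyb y (by simp), pvStepA_b a b st hab]
    exact ih _ hxa (fun q hq => hyb q (List.mem_cons_of_mem _ hq))

-- a fst-increasing list: equal firsts force equal elements
theorem pvPairwise_fst_inj (l : List (Int × Char))
    (hpw : l.Pairwise (fun q r => q.1 < r.1)) :
    ∀ x ∈ l, ∀ y ∈ l, x.1 = y.1 → x = y := by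
  have hpw' : l.Pairwise (fun q r : Int × Char => q.1 = r.1 → q = r) :=
    hpw.imp (fun h h' => absurd h' (ne_of_lt h))
  intro x hx y hy hxy
  by_cases hne : x = y
  · exact hne
  · rcases List.Pairwise.forall (fun {p q} h h' => (h (h'.symm)).symm) hpw' hx hy hne with h
    exact h hxy

-- index-directed flatMap over a duplicate-free list, in element form
theorem pvFlatMap_range_erase (F : Char → List Char → List (List Char)) :
    ∀ (xs : List Char), xs.Nodup →
    (List.range xs.length).flatMap (fun i => F xs[i]! (xs.eraseIdx i))
      = xs.flatMap (fun a => F a (xs.filter (fun x => !(x == a)))) := by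
  intro xs
  induction xs generalizing F with
  | nil => intro _; rfl
  | cons x xs ih =>
    intro h
    have hx : x ∉ xs := (List.nodup_cons.mp h).1
    have hnd : xs.Nodup := (List.nodup_cons.mp h).2
    rw [List.length_cons, List.range_succ_eq_map, List.flatMap_cons, List.flatMap_map]
    simp only [Nat.succ_eq_add_one, List.getElem!_cons_zero,
      List.getElem!_cons_succ, List.eraseIdx_cons_zero, List.eraseIdx_cons_succ]
    rw [ih (fun c l => F c (x :: l)) hnd, List.flatMap_cons]
    have hfx : (x :: xs).filter (fun z => !(z == x)) = xs := by
      simp only [List.filter_cons, beq_self_eq_true, Bool.not_true, Bool.false_eq_true,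
        if_false]
      exact List.filter_eq_self.mpr (fun b hb => by
        simp [show b ≠ x from fun e => hx (e ▸ hb)])
    rw [hfx]
    refine congrArg (F x xs ++ ·) (List.flatMap_congr (fun a ha => ?_))
    have hxa : (x == a) = false := by
      simp [show x ≠ a from fun e => hx (e ▸ ha)]
    simp [hxa]

theorem pvPermutations_one (xs : List Char) (h : xs.Nodup) :
    PySem.List.permutations xs 1 = xs.map (fun a => [a]) := by
  rw [PySem.List.permutations]
  have h0 : ∀ l : List Char, PySem.List.permutations l 0 = [[]] := fun _ => rfl
  refine Eq.trans (List.flatMap_congr (g := fun i => [[xs[i]!]]) (fun i hi => ?_))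
    (Eq.trans (pvFlatMap_range_erase (fun c _ => [[c]]) xs h) ?_)
  · have hi' : i < xs.length := List.mem_range.mp hi
    simp [h0, List.getElem!_eq_getElem?_getD, List.getElem?_eq_getElem hi']
  · show List.flatMap (fun a => [[a]]) xs = xs.map (fun a => [a])
    induction xs with
    | nil => rfl
    | cons x xs ih => simpa using ih (List.Nodup.of_cons h)

-- itertools.permutations(xs, 2) over a duplicate-free xs
theorem pvPermutations_two (xs : List Char) (h : xs.Nodup) :
    PySem.List.permutations xs 2
      = xs.flatMap (fun a => (xs.filter (fun x => !(x == a))).map (fun b => [a, b])) := by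
  rw [PySem.List.permutations]
  refine Eq.trans (List.flatMap_congr
      (g := fun i => (PySem.List.permutations (xs.eraseIdx i) 1).map (xs[i]! :: ·))
      (fun i hi => ?_))
    (Eq.trans (pvFlatMap_range_erase
      (fun c l => (PySem.List.permutations l 1).map (c :: ·)) xs h)
      (List.flatMap_congr (fun a ha => ?_)))
  · have hi' : i < xs.length := List.mem_range.mp hi
    simp [List.getElem!_eq_getElem?_getD, List.getElem?_eq_getElem hi']
  · show (PySem.List.permutations (xs.filter (fun x => !(x == a))) 1).map (a :: ·)
        = (xs.filter (fun x => !(x == a))).map (fun b => [a, b])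
    rw [pvPermutations_one _ (h.filter _), List.map_map]
    rfl

-- the whole inner pass: A's fold over the re-sorted concatenation = B's two-pointer merge
theorem pvInner_eq (a b : Char) (hab : a ≠ b) (l : List (Int × Char))
    (hpw : l.Pairwise (fun q r => q.1 < r.1)) (st : Int × Bool × Int) :
    (PySem.List.sorted2 (l.filter (fun q => q.2 == a) ++ l.filter (fun q => q.2 == b))
        (·.1) (·.2)).foldl (fun st q => pvStepA a b st q.2) st
      = pvMergeRun ((l.filter (fun q => q.2 == a)).map (·.1))
          ((l.filter (fun q => q.2 == b)).map (·.1)) st := by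
  have hdisj : ∀ q : Int × Char, (q.2 == a) = true → (q.2 == b) = false := by
    intro q hq
    simp only [beq_iff_eq] at hq
    simp only [beq_eq_false_iff_ne, ne_eq]
    exact fun hb => hab (hq.symm.trans hb)
  have hperm := pvFilter_or_perm _ _ hdisj l
  have hpw_or : (l.filter (fun q => (q.2 == a) || (q.2 == b))).Pairwise
      (fun q r : Int × Char => q.1 < r.1) := List.Pairwise.filter _ hpw
  have hsub : ∀ x ∈ l.filter (fun q => q.2 == a) ++ l.filter (fun q => q.2 == b), x ∈ l := by
    intro x hx
    rcases List.mem_append.mp hx with hx | hx <;> exact List.mem_of_mem_filter hx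
  rw [pvSorted2_eq_sorted _ (fun x hx y hy =>
        pvPairwise_fst_inj l hpw x (hsub x hx) y (hsub y hy)),
    PySem.List.sorted_eq_of_perm_of_pairwise_lt _ _ _ hperm hpw_or,
    ← pvMrg_filter _ _ l hpw hdisj,
    pvMergeRun_eq_foldl a b hab _ _ st
      (fun q hq => beq_iff_eq.mp (List.mem_filter.mp hq).2)
      (fun q hq => beq_iff_eq.mp (List.mem_filter.mp hq).2)]

-- ===== VERDICT (by name: the statement is the Claim_ definition above) =====
-- per-character facts about the dictionaries the two programs build
theorem pvCC_getD (s : String) (c : Char) :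
    ((PySem.List.enumerate s.toList 0).foldl
        (fun (d : PySem.Dict Char Int) (q : Int × Char) => d.modify q.2 0 (· + 1))
        PySem.Dict.empty).getD c 0 = (s.toList.count c : Int) := by
  rw [show (PySem.List.enumerate s.toList 0).foldl
        (fun (d : PySem.Dict Char Int) (q : Int × Char) => d.modify q.2 0 (· + 1))
        PySem.Dict.empty
      = ((PySem.List.enumerate s.toList 0).map (·.2)).foldl
          (fun d x => d.modify x 0 (· + 1)) PySem.Dict.empty from
      (List.foldl_map (f := fun q : Int × Char => q.2)
        (g := fun (d : PySem.Dict Char Int) x => d.modify x 0 (· + 1))).symm,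
    PySem.List.map_snd_enumerate, PySem.Dict.getD_foldl_modify_add_one,
    PySem.Dict.getD_empty, zero_add]

theorem pvCC_keys (s : String) :
    ((PySem.List.enumerate s.toList 0).foldl
        (fun (d : PySem.Dict Char Int) (q : Int × Char) => d.modify q.2 0 (· + 1))
        PySem.Dict.empty).keys = PySem.Set.ofList s.toList := by
  rw [PySem.Dict.keys_foldl_modify_key _ (fun q : Int × Char => q.2) 0 (fun _ _ => (· + 1)),
    PySem.Dict.keys_empty, PySem.List.map_snd_enumerate, PySem.Set.update_nil_left]

theorem pvCI_getD (s : String) (c : Char) :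
    ((PySem.List.enumerate s.toList 0).foldl
        (fun (d : PySem.Dict Char (List (Int × Char))) (q : Int × Char) =>
          d.modify q.2 [] (· ++ [q]))
        PySem.Dict.empty).getD c []
      = (PySem.List.enumerate s.toList 0).filter (fun q => q.2 == c) := by
  rw [show (PySem.List.enumerate s.toList 0).foldl
        (fun (d : PySem.Dict Char (List (Int × Char))) (q : Int × Char) =>
          d.modify q.2 [] (· ++ [q])) PySem.Dict.empty
      = ((PySem.List.enumerate s.toList 0).map (fun q => (q.2, q))).foldl
          (fun d p => d.modify p.1 [] (· ++ [p.2])) PySem.Dict.empty from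
      (List.foldl_map (f := fun q : Int × Char => (q.2, q))
        (g := fun (d : PySem.Dict Char (List (Int × Char))) p =>
          d.modify p.1 [] (· ++ [p.2]))).symm,
    PySem.Dict.getD_foldl_modify_append, PySem.Dict.getD_empty, List.nil_append,
    List.filter_map, List.map_map]
  simp [Function.comp_def]

theorem pvPOS_getD (s : String) (c : Char) :
    ((PySem.List.enumerate s.toList 0).foldl
        (fun (d : PySem.Dict Char (List Int)) (q : Int × Char) =>
          d.modify q.2 [] (· ++ [q.1]))
        PySem.Dict.empty).getD c []
      = ((PySem.List.enumerate s.toList 0).filter (fun q => q.2 == c)).map (·.1) := by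
  rw [show (PySem.List.enumerate s.toList 0).foldl
        (fun (d : PySem.Dict Char (List Int)) (q : Int × Char) =>
          d.modify q.2 [] (· ++ [q.1])) PySem.Dict.empty
      = ((PySem.List.enumerate s.toList 0).map (fun q => (q.2, q.1))).foldl
          (fun d p => d.modify p.1 [] (· ++ [p.2])) PySem.Dict.empty from
      (List.foldl_map (f := fun q : Int × Char => (q.2, q.1))
        (g := fun (d : PySem.Dict Char (List Int)) p =>
          d.modify p.1 [] (· ++ [p.2]))).symm,
    PySem.Dict.getD_foldl_modify_append, PySem.Dict.getD_empty, List.nil_append,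
    List.filter_map, List.map_map]
  simp [Function.comp_def]

theorem pvPOS_keys (s : String) :
    ((PySem.List.enumerate s.toList 0).foldl
        (fun (d : PySem.Dict Char (List Int)) (q : Int × Char) =>
          d.modify q.2 [] (· ++ [q.1]))
        PySem.Dict.empty).keys = PySem.Set.ofList s.toList := by
  rw [PySem.Dict.keys_foldl_modify_key _ (fun q : Int × Char => q.2) []
      (fun _ q => (· ++ [q.1])),
    PySem.Dict.keys_empty, PySem.List.map_snd_enumerate, PySem.Set.update_nil_left]

-- B's insert-or-append loop body is exactly a defaultdict-style modify
theorem pvPOS_step (s : String) :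
    (PySem.List.enumerate s.toList 0).foldl
        (fun (d : PySem.Dict Char (List Int)) (q : Int × Char) =>
          if d.contains q.2 then d.modify q.2 [] (· ++ [q.1]) else d.insert q.2 [q.1])
        PySem.Dict.empty
      = (PySem.List.enumerate s.toList 0).foldl
          (fun (d : PySem.Dict Char (List Int)) (q : Int × Char) =>
            d.modify q.2 [] (· ++ [q.1]))
          PySem.Dict.empty := by
  have h : (fun (d : PySem.Dict Char (List Int)) (q : Int × Char) =>
        if d.contains q.2 then d.modify q.2 [] (· ++ [q.1]) else d.insert q.2 [q.1])
      = fun d q => d.modify q.2 [] (· ++ [q.1]) := by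
    funext d q
    by_cases h : d.contains q.2 = true
    · simp [h]
    · simp only [Bool.not_eq_true] at h
      simp [h, PySem.Dict.modify, PySem.Dict.getD_of_not_contains d _ h]
  rw [h]

theorem pvLen_filter (s : String) (c : Char) :
    ((((PySem.List.enumerate s.toList 0).filter (fun q => q.2 == c)).map (·.1)).length : Int)
      = (s.toList.count c : Int) := by
  rw [List.length_map, ← List.countP_eq_length_filter,
    show (PySem.List.enumerate s.toList 0).countP (fun q => q.2 == c)
        = ((PySem.List.enumerate s.toList 0).map (·.2)).countP (· == c) from
      (List.countP_map (p := (· == c)) (f := fun q : Int × Char => q.2)).symm,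
    PySem.List.map_snd_enumerate, List.count_eq_countP]

theorem largestVariance_spec : Claim_equal_largestVariance := by
  intro s _
  unfold Spec_largestVariance largestVariance largestVariance_alt
  rw [PySem.List.foldl_prod_mk
      (f := fun (d : PySem.Dict Char Int) (q : Int × Char) => d.modify q.2 0 (· + 1))
      (g := fun (d : PySem.Dict Char (List (Int × Char))) (q : Int × Char) =>
        d.modify q.2 [] (· ++ [q])),
    pvPOS_step s]
  simp only [pvCC_getD, pvCC_keys, pvCI_getD, pvPOS_getD, pvPOS_keys]
  rw [pvPermutations_two _ (PySem.Set.nodup_ofList s.toList), List.foldl_flatMap]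
  refine PySem.List.foldl_congr_mem _ _ _ _ (fun mv a ha => ?_)
  rw [List.foldl_map, ← PySem.List.foldl_if_eq_foldl_filter (fun x => !(x == a))]
  refine PySem.List.foldl_congr_mem _ _ _ _ (fun best b hb => ?_)
  by_cases hba : b = a
  · subst hba
    simp
  · have hba' : (b == a) = false := beq_eq_false_iff_ne.mpr hba
    rw [pvLen_filter]
    simp only [hba', Bool.not_false, if_true]
    by_cases hle : (s.toList.count b : Int) - 1 ≤ best
    · rw [if_neg (not_lt_of_ge hle), if_pos (Or.inr hle)]
    · rw [if_pos (lt_of_not_ge hle), if_neg (by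
        push Not
        exact ⟨fun h => hba (h.symm), lt_of_not_ge hle⟩)]
      rw [pvInner_eq a b (fun h => hba h.symm) _
        (PySem.List.pairwise_lt_enumerate s.toList 0) (0, false, best)]
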